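-- pv_equiv track=rewrite | github.com/abril-student/concurrent-url-downloader | downloader.py | calc_ranges
-- ===== SOURCE A (Python) =====
-- from math import ceil
--
-- def calc_ranges(total_size, workers, chunk_size_mb):
--     if chunk_size_mb and chunk_size_mb > 0:
--         chunk = chunk_size_mb * 1024 * 1024
--         num_parts = ceil(total_size / chunk)
--         chunk_size = chunk
--         workers_eff = min(workers, num_parts)
--     else:
--         num_parts = max(1, workers)
--         chunk_size = ceil(total_size / num_parts)
--         workers_eff = num_parts
--     ranges = []
--     start = 0
--     for i in range(1, num_parts + 1):
--         end = min(start + chunk_size - 1, total_size - 1)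
--         ranges.append((i, start, end))
--         start = end + 1
--     return ranges, workers_eff, num_parts, chunk_size
-- ===== SOURCE B (Python) =====
-- def calc_ranges(total_size, workers, chunk_size_mb):
--     fixed = chunk_size_mb if chunk_size_mb and chunk_size_mb > 0 else None
--     if fixed is None:
--         num_parts = max(1, workers)
--         chunk_size = -((-total_size) // num_parts)
--         workers_eff = num_parts
--     else:
--         chunk_size = fixed * 1024 * 1024
--         num_parts = -((-total_size) // chunk_size)
--         workers_eff = min(workers, num_parts)
--     cuts = [min(k * chunk_size, total_size) for k in range(num_parts + 1)]
--     ranges = [(i, s, e - 1) for i, (s, e) in zip(range(1, num_parts + 1), zip(cuts, cuts[1:]))]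
--     return ranges, workers_eff, num_parts, chunk_size
-- ===== Notes on version B (the rewrite author's own statement) =====
-- stated objective: alternative
-- what changed: B computes sizes via integer ceiling division instead of math.ceil and builds the ranges in staged passes: a cut-points list cuts[k]=min(k*chunk_size,total_size) first, then zips consecutive cut pairs with the part indices, replacing A's single loop with a carried start variable.
-- outside the precondition, e.g. on calc_ranges(-2, 1, None): A returns ([(1, 0, -3)], 1, 1, -2), B returns ([(1, -2, -3)], 1, 1, -2)
import Mathlib
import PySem

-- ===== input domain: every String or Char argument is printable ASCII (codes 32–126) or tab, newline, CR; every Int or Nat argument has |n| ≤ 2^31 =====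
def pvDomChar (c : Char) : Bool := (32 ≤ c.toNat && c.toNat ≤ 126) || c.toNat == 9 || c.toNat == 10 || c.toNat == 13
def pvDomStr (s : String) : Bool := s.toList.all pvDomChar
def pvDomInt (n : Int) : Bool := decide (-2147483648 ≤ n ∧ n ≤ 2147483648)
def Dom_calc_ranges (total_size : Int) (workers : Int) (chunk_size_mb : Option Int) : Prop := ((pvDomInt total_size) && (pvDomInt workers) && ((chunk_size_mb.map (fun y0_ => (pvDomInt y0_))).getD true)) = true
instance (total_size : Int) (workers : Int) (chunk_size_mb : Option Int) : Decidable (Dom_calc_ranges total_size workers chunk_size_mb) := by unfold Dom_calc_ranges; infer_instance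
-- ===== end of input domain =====

-- B builds the ranges in staged passes (a cut-points list, then a zip of consecutive cuts with the
-- part indices) instead of A's accumulating loop, and uses integer ceiling division instead of
-- math.ceil (objective: alternative; same cost). Pre_ restricts to the natural domain of file sizes.


-- ===== PORT A =====
-- math.ceil(a / b): exact as -((-a) // b) here since |a|,|b| ≤ 2^31 < 2^53 means the float
-- division never rounds across an integer.
def pyCeilDiv (a b : Int) : Int := -(PySem.Int.floordiv (-a) b)

def calc_ranges (total_size : Int) (workers : Int) (chunk_size_mb : Option Int) : (List (Int × Int × Int)) × Int × Int × Int :=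
  -- `if chunk_size_mb and chunk_size_mb > 0` : truthy (non-None, nonzero) and positive
  let hdr : Int × Int × Int :=      -- (num_parts, chunk_size, workers_eff)
    if (match chunk_size_mb with | some m => decide (m > 0) | none => false) then
      let chunk := chunk_size_mb.getD 0 * 1024 * 1024
      let num_parts := pyCeilDiv total_size chunk
      (num_parts, chunk, min workers num_parts)
    else
      let num_parts := max 1 workers
      (num_parts, pyCeilDiv total_size num_parts, num_parts)
  let num_parts := hdr.1
  let chunk_size := hdr.2.1
  let workers_eff := hdr.2.2
  let st := (PySem.List.pyRange 1 (num_parts + 1) 1).foldl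
      (fun (st : List (Int × Int × Int) × Int) i =>
        let e := min (st.2 + chunk_size - 1) (total_size - 1)
        (st.1 ++ [(i, st.2, e)], e + 1)) ([], 0)
  (st.1, workers_eff, num_parts, chunk_size)

-- ===== PORT B =====
def calc_ranges_alt (total_size : Int) (workers : Int) (chunk_size_mb : Option Int) : (List (Int × Int × Int)) × Int × Int × Int :=
  -- `chunk_size_mb if chunk_size_mb and chunk_size_mb > 0 else None` (truthy-and-positive)
  let fixed : Option Int := match chunk_size_mb with
    | some m => if 0 < m then some m else none
    | none => none
  let hdr : Int × Int × Int :=      -- (num_parts, chunk_size, workers_eff)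
    match fixed with
    | none =>
        let num_parts := max 1 workers
        (num_parts, -(PySem.Int.floordiv (-total_size) num_parts), num_parts)
    | some m =>
        let chunk_size := m * 1024 * 1024
        let num_parts := -(PySem.Int.floordiv (-total_size) chunk_size)
        (num_parts, chunk_size, min workers num_parts)
  let num_parts := hdr.1
  let chunk_size := hdr.2.1
  let workers_eff := hdr.2.2
  let cuts := (PySem.List.pyRange 0 (num_parts + 1) 1).map (fun k => min (k * chunk_size) total_size)
  let ranges := ((PySem.List.pyRange 1 (num_parts + 1) 1).zip
                  (cuts.zip (PySem.List.slice cuts (some 1) none))).map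
                (fun p => (p.1, p.2.1, p.2.2 - 1))
  (ranges, workers_eff, num_parts, chunk_size)

-- ===== PRECONDITION & SPEC =====
-- Pre_ excludes negative total_size when no positive chunk_size_mb is given (the workers-split
-- branch), outside the natural domain of file sizes: there A still returns, but its byte ranges are
-- artefacts of the loop-carried start that B does not reproduce (with a positive chunk_size_mb a
-- negative size yields no ranges in both, so those inputs stay inside Pre_).
def Pre_calc_ranges (total_size : Int) (workers : Int) (chunk_size_mb : Option Int) : Prop :=
  0 ≤ total_size ∨ 0 < chunk_size_mb.getD 0
instance (total_size : Int) (workers : Int) (chunk_size_mb : Option Int) : Decidable (Pre_calc_ranges total_size workers chunk_size_mb) := by unfold Pre_calc_ranges; infer_instance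

def pvWitness_calc_ranges : Int × Int × Option Int := (10, 3, none)

def Spec_calc_ranges (total_size : Int) (workers : Int) (chunk_size_mb : Option Int) (out : (List (Int × Int × Int)) × Int × Int × Int) : Prop := out = calc_ranges_alt total_size workers chunk_size_mb
instance (total_size : Int) (workers : Int) (chunk_size_mb : Option Int) (out : (List (Int × Int × Int)) × Int × Int × Int) : Decidable (Spec_calc_ranges total_size workers chunk_size_mb out) := by unfold Spec_calc_ranges; infer_instance

-- ===== CLAIM (what is proved, stated in full; the proofs are below) =====
def Claim_equal_calc_ranges : Prop := ∀ (total_size : Int) (workers : Int) (chunk_size_mb : Option Int), Dom_calc_ranges total_size workers chunk_size_mb → Pre_calc_ranges total_size workers chunk_size_mb → Spec_calc_ranges total_size workers chunk_size_mb (calc_ranges total_size workers chunk_size_mb)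

-- ===== LEMMAS AND PROOFS =====

-- A's loop over range(1, n+1), started from start = 0, produces per-index ranges
-- (i, min((i-1)c, t), min(ic-1, t-1)) and ends with start = min(n*c, t), for 0 ≤ c, 0 ≤ t.
theorem cr_loop_eq (c t : Int) (hc : 0 ≤ c) (ht : 0 ≤ t) : ∀ n : Nat,
    (PySem.List.pyRange 1 ((n : Int) + 1) 1).foldl
      (fun (st : List (Int × Int × Int) × Int) i =>
        (st.1 ++ [(i, st.2, min (st.2 + c - 1) (t - 1))], min (st.2 + c - 1) (t - 1) + 1)) ([], 0)
    = ((PySem.List.pyRange 1 ((n : Int) + 1) 1).map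
        (fun i => (i, min ((i - 1) * c) t, min (i * c - 1) (t - 1))),
       min ((n : Int) * c) t) := by
  intro n
  induction n with
  | zero =>
      rw [PySem.List.pyRange_one_eq_nil (by omega)]
      simp
      omega
  | succ m ih =>
      rw [show ((m + 1 : Nat) : Int) + 1 = ((m : Int) + 1) + 1 by push_cast; ring,
          PySem.List.pyRange_one_succ_right (by omega)]
      rw [List.foldl_append, List.map_append, ih]
      simp only [List.foldl_cons, List.foldl_nil, List.map_cons, List.map_nil,
        Prod.mk.injEq, List.append_cancel_left_eq, List.cons.injEq, Prod.mk.injEq]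
      push_cast
      have hmc : ((m : Int) + 1) * c = (m : Int) * c + c := by ring
      have hmc2 : ((m : Int) + 1 - 1) * c = (m : Int) * c := by ring
      and_intros <;> first | trivial | omega

-- zipping a map over range(a, n) with its own tail pairs each g i with g (i+1)
theorem cuts_zip_eq {α : Type} (g : Int → α) : ∀ (k : Nat) (a n : Int), n - a = (k : Int) →
    ((PySem.List.pyRange a n 1).map g).zip (((PySem.List.pyRange a n 1).map g).tail)
    = (PySem.List.pyRange (a + 1) n 1).map (fun i => (g (i - 1), g i)) := by
  intro k
  induction k with
  | zero =>
      intro a n h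
      rw [PySem.List.pyRange_one_eq_nil (by omega), PySem.List.pyRange_one_eq_nil (by omega)]
      simp
  | succ m ih =>
      intro a n h
      by_cases hm2 : a + 1 < n
      · have ihv := ih (a + 1) n (by omega)
        rw [PySem.List.pyRange_one_cons hm2] at ihv
        simp only [List.map_cons, List.tail_cons] at ihv
        rw [PySem.List.pyRange_one_cons (show a < n by omega),
            PySem.List.pyRange_one_cons hm2]
        simp only [List.map_cons, List.tail_cons, List.zip_cons_cons, List.cons.injEq]
        exact ⟨by rw [show a + 1 - 1 = a by ring], ihv⟩
      · rw [show n = a + 1 by omega, PySem.List.pyRange_one_singleton,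
            PySem.List.pyRange_one_eq_nil (le_refl _)]
        simp

-- zipping a list with a map of itself pairs each element with its image
theorem zip_self_map {α : Type} (h : Int → α) : ∀ (l : List Int),
    l.zip (l.map h) = l.map (fun x => (x, h x)) := by
  intro l
  induction l with
  | nil => simp
  | cons x xs ih => simp [ih]

-- given the header (num_parts np, chunk_size c, workers_eff we), A's tail equals B's tail
theorem cr_tail_eq (t np c we : Int) (hc : 0 ≤ c) (ht : 0 ≤ t ∨ np ≤ 0) :
    (((PySem.List.pyRange 1 (np + 1) 1).foldl
        (fun (st : List (Int × Int × Int) × Int) i =>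
          (st.1 ++ [(i, st.2, min (st.2 + c - 1) (t - 1))], min (st.2 + c - 1) (t - 1) + 1))
        ([], 0)).1, we, np, c)
    = (((PySem.List.pyRange 1 (np + 1) 1).zip
          ((((PySem.List.pyRange 0 (np + 1) 1).map (fun k => min (k * c) t)).zip
            (PySem.List.slice ((PySem.List.pyRange 0 (np + 1) 1).map (fun k => min (k * c) t))
              (some 1) none)))).map (fun p => (p.1, p.2.1, p.2.2 - 1)), we, np, c) := by
  rw [PySem.List.slice_from_one]
  by_cases hnp : np ≤ 0
  · rw [PySem.List.pyRange_one_eq_nil (show np + 1 ≤ 1 by omega)]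
    simp
  · have ht' : 0 ≤ t := ht.resolve_right hnp
    have hn : np = ((np.toNat : Nat) : Int) := by omega
    rw [hn, cr_loop_eq c t hc ht' np.toNat,
        cuts_zip_eq (fun k => min (k * c) t) (np.toNat + 1) 0 (((np.toNat : Nat) : Int) + 1)
          (by push_cast; ring),
        zero_add, zip_self_map, List.map_map]
    simp only [Prod.mk.injEq, and_true]
    apply List.map_congr_left
    intro i _
    simp only [Function.comp, Prod.mk.injEq, true_and]
    omega

-- ===== VERDICT (by name: the statement is the Claim_ definition above) =====
theorem calc_ranges_spec : Claim_equal_calc_ranges := by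
  intro t w cmb _ hpre
  unfold Spec_calc_ranges calc_ranges calc_ranges_alt
  have hceil : ∀ b : Int, 0 < b → 0 ≤ t → 0 ≤ pyCeilDiv t b := by
    intro b hb ht
    simp only [pyCeilDiv, PySem.Int.floordiv_eq_ediv_of_pos hb]
    have : (-t) / b ≤ 0 := Int.ediv_nonpos_of_nonpos_of_neg (by omega) hb
    omega
  -- when t < 0 and the chunk is positive, ceil(t / chunk) ≤ 0: no parts at all
  have hceil' : ∀ b : Int, 0 < b → t < 0 → pyCeilDiv t b ≤ 0 := by
    intro b hb htneg
    simp only [pyCeilDiv, PySem.Int.floordiv_eq_ediv_of_pos hb]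
    have : 0 ≤ (-t) / b := Int.ediv_nonneg (by omega) (by omega)
    omega
  match cmb with
  | none =>
      have ht : (0 : Int) ≤ t := by simpa using hpre.resolve_right (by simp)
      exact cr_tail_eq t _ _ _ (hceil (max 1 w) (by omega) ht) (Or.inl ht)
  | some m =>
      by_cases hm : m > 0
      · simp only [hm, decide_true, if_true, Option.getD_some]
        refine cr_tail_eq t _ _ _ (by positivity) ?_
        by_cases ht : 0 ≤ t
        · exact Or.inl ht
        · exact Or.inr (hceil' (m * 1024 * 1024) (by positivity) (by omega))
      · simp only [hm, decide_false]
        have ht : (0 : Int) ≤ t := by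
          rcases hpre with h | h
          · exact h
          · simp only [Option.getD_some] at h; omega
        exact cr_tail_eq t _ _ _ (hceil (max 1 w) (by omega) ht) (Or.inl ht)
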